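-- pv_equiv track=rewrite | github.com/depaulobrunna/python_codes | gps/packbuild.py | pckg
-- ===== SOURCE A (Python) =====
-- def cks(buffer):
--     ck_a =0
--     ck_b =0
--
--     for data in buffer:
--         ck_a = (ck_a + data)& 0xFF
--         ck_b = (ck_b + ck_a)& 0xFF
--
--     return [ck_a, ck_b]
--
-- def pckg(clas, id, length, payload):
--
--     temp = [clas, id, length&0x00FF, (length&0xFF00)>>8]
--     for data in payload:
--         temp.append(data)
--     [ck_a, ck_b] = cks(temp)
--     Temp = [0xB5, 0x62]
--     Temp.append(clas)
--     Temp.append(id)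
--     Temp.append(length&0x00FF)
--     Temp.append((length&0xFF00)>>8)
--     for data in payload:
--         Temp.append(data)
--     Temp.append(ck_a)
--     Temp.append(ck_b)
--
--     return Temp
-- ===== SOURCE B (Python) =====
-- def pckg(clas, id, length, payload):
--     body = [clas, id, length & 0x00FF, (length & 0xFF00) >> 8] + list(payload)
--     n = len(body)
--     ck_a = sum(body) & 0xFF
--     ck_b = sum((n - i) * b for i, b in enumerate(body)) & 0xFF
--     return [0xB5, 0x62] + body + [ck_a, ck_b]
-- ===== Notes on version B (the rewrite author's own statement) =====
-- stated objective: alternative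
-- what changed: Replaces the running two-accumulator Fletcher loop and the second element-by-element rebuild of the packet with closed-form sums: ck_a = sum(body) & 0xFF and ck_b as a weighted sum ((n-i)*b) over the enumerated body, assembled by plain list concatenation.
import Mathlib
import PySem

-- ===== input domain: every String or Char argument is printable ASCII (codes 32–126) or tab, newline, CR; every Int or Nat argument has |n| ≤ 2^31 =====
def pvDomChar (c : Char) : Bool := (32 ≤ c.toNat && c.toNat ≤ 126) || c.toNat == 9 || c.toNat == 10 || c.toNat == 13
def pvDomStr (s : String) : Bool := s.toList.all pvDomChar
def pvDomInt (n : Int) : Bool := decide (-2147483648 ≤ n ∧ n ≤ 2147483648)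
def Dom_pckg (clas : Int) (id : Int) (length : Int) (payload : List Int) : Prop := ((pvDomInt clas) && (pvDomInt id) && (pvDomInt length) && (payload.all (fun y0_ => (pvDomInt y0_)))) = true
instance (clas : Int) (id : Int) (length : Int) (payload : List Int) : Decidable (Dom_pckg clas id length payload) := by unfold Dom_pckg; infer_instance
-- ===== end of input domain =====

-- B replaces A's running two-accumulator checksum loop and second append-by-append rebuild
-- with closed-form masked sums (plain and index-weighted) over the body, assembled by concatenation.


-- ===== PORT A =====
-- cks: running Fletcher accumulators, each step masked with & 0xFF
def cks (buffer : List Int) : List Int :=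
  let s := buffer.foldl
    (fun (p : Int × Int) data =>
      let a := PySem.Int.band (p.1 + data) 255
      (a, PySem.Int.band (p.2 + a) 255)) (0, 0)
  [s.1, s.2]

def pckg (clas : Int) (id : Int) (length : Int) (payload : List Int) : List Int :=
  let temp := payload.foldl (fun t d => t ++ [d])
    [clas, id, PySem.Int.band length 255, (PySem.Int.band length 65280) >>> 8]
  match cks temp with
  | [ck_a, ck_b] =>
    let T := [(181 : Int), 98]
    let T := T ++ [clas]
    let T := T ++ [id]
    let T := T ++ [PySem.Int.band length 255]
    let T := T ++ [(PySem.Int.band length 65280) >>> 8]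
    let T := payload.foldl (fun t d => t ++ [d]) T
    let T := T ++ [ck_a]
    T ++ [ck_b]
  | _ => []  -- unreachable: cks always returns a two-element list

-- ===== PORT B =====
def pckg_alt (clas : Int) (id : Int) (length : Int) (payload : List Int) : List Int :=
  let body := [clas, id, PySem.Int.band length 255, (PySem.Int.band length 65280) >>> 8] ++ payload
  let n : Int := body.length
  let ck_a := PySem.Int.band (body.sum) 255
  let ck_b := PySem.Int.band ((PySem.List.enumerate body).foldl (fun s p => s + (n - p.1) * p.2) 0) 255
  [181, 98] ++ body ++ [ck_a, ck_b]

-- ===== PRECONDITION & SPEC =====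
def Spec_pckg (clas : Int) (id : Int) (length : Int) (payload : List Int) (out : List Int) : Prop := out = pckg_alt clas id length payload
instance (clas : Int) (id : Int) (length : Int) (payload : List Int) (out : List Int) : Decidable (Spec_pckg clas id length payload out) := by unfold Spec_pckg; infer_instance

-- ===== CLAIM (what is proved, stated in full; the proofs are below) =====
def Claim_equal_pckg : Prop := ∀ (clas : Int) (id : Int) (length : Int) (payload : List Int), Dom_pckg clas id length payload → Spec_pckg clas id length payload (pckg clas id length payload)

-- ===== LEMMAS AND PROOFS =====

-- Python's  x & 0xFF  is  x mod 256  (both signs)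
theorem band255_eq_emod (x : Int) : PySem.Int.band x 255 = x % 256 := by
  unfold PySem.Int.band
  by_cases h : 0 ≤ x
  · rw [if_pos h, if_pos (by norm_num : (0:Int) ≤ 255)]
    have h8 : x.toNat &&& (255:Int).toNat = x.toNat % 256 := by
      have := Nat.and_two_pow_sub_one_eq_mod x.toNat 8
      norm_num at this; simpa using this
    rw [h8]; omega
  · rw [if_neg h, if_pos (by norm_num : (0:Int) ≤ 255)]
    have h8 : (255:Int).toNat &&& (-x - 1).toNat = (-x - 1).toNat % 256 := by
      have := Nat.and_two_pow_sub_one_eq_mod (-x - 1).toNat 8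
      norm_num at this; rw [Nat.and_comm]; simpa using this
    rw [h8]; omega

-- weighted tail sum: Wt [] = 0, Wt (x :: t) = |x::t| * x + Wt t
def Wt : List Int → Int
  | [] => 0
  | x :: t => ((t.length : Int) + 1) * x + Wt t

theorem foldl_append_singleton (l : List Int) (init : List Int) :
    l.foldl (fun t d => t ++ [d]) init = init ++ l := by
  induction l generalizing init with
  | nil => simp
  | cons x t ih => simp [List.foldl, ih, List.append_assoc]

-- the Fletcher fold in closed form (mod 256), for reduced starting state
theorem cks_fold (l : List Int) :
    ∀ a b : Int, a % 256 = a → b % 256 = b →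
    l.foldl (fun (p : Int × Int) data =>
      let a := PySem.Int.band (p.1 + data) 255
      (a, PySem.Int.band (p.2 + a) 255)) (a, b)
    = ((a + l.sum) % 256, (b + (l.length : Int) * a + Wt l) % 256) := by
  induction l with
  | nil => intro a b ha hb; simp [ha, hb, Wt]
  | cons x t ih =>
    intro a b ha hb
    simp only [List.foldl]
    rw [ih (PySem.Int.band (a + x) 255) (PySem.Int.band (b + PySem.Int.band (a + x) 255) 255)
        (by rw [band255_eq_emod]; exact Int.emod_emod_of_dvd _ dvd_rfl)
        (by rw [band255_eq_emod]; exact Int.emod_emod_of_dvd _ dvd_rfl)]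
    simp only [band255_eq_emod]
    have hax : (a + x) % 256 ≡ a + x [ZMOD 256] := Int.emod_emod_of_dvd _ dvd_rfl
    rw [Prod.mk.injEq]
    constructor
    · show ((a + x) % 256 + t.sum) % 256 = (a + (x :: t).sum) % 256
      have : ((a + x) % 256 + t.sum) ≡ (a + (x + t.sum)) [ZMOD 256] := by
        calc ((a + x) % 256 + t.sum) ≡ (a + x) + t.sum [ZMOD 256] := hax.add_right _
          _ = a + (x + t.sum) := by ring
      rw [List.sum_cons]; exact this
    · show ((b + (a + x) % 256) % 256 + (t.length : Int) * ((a + x) % 256) + Wt t) % 256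
        = (b + ((x :: t).length : Int) * a + Wt (x :: t)) % 256
      have hb' : (b + (a + x) % 256) % 256 ≡ b + (a + x) [ZMOD 256] :=
        (Int.emod_emod_of_dvd _ dvd_rfl).trans (hax.add_left b)
      have h2 : (t.length : Int) * ((a + x) % 256) ≡ (t.length : Int) * (a + x) [ZMOD 256] :=
        hax.mul_left _
      have : ((b + (a + x) % 256) % 256 + (t.length : Int) * ((a + x) % 256) + Wt t)
          ≡ (b + ((t.length : Int) + 1) * a + (((t.length : Int) + 1) * x + Wt t)) [ZMOD 256] := by
        calc ((b + (a + x) % 256) % 256 + (t.length : Int) * ((a + x) % 256) + Wt t)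
            ≡ (b + (a + x)) + (t.length : Int) * (a + x) + Wt t [ZMOD 256] :=
              (hb'.add h2).add_right _
          _ = b + ((t.length : Int) + 1) * a + (((t.length : Int) + 1) * x + Wt t) := by ring
      simp only [Wt, List.length_cons]; exact_mod_cast this
    
-- B's enumerate fold computes Wt when the outer constant n is the list's length
theorem enum_fold (n : Int) (l : List Int) :
    ∀ (s acc : Int), n - s = (l.length : Int) →
    (PySem.List.enumerate l s).foldl (fun t p => t + (n - p.1) * p.2) acc = acc + Wt l := by
  induction l with
  | nil => intro s acc _; simp [PySem.List.enumerate_nil, Wt]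
  | cons x t ih =>
    intro s acc h
    rw [PySem.List.enumerate_cons]
    simp only [List.foldl]
    rw [ih (s + 1) _ (by simp at h ⊢; omega)]
    have hns : n - s = (t.length : Int) + 1 := by simp at h; omega
    simp [Wt]; rw [hns]; ring

-- ===== VERDICT (by name: the statement is the Claim_ definition above) =====
theorem pckg_spec : Claim_equal_pckg := by
  intro clas id length payload _
  unfold Spec_pckg
  simp only [pckg, pckg_alt, cks, foldl_append_singleton]
  rw [cks_fold _ 0 0 (by decide) (by decide)]
  rw [enum_fold _ _ 0 0 (by simp)]
  simp [band255_eq_emod, List.append_assoc]
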